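-- pv_equiv track=rewrite | github.com/gogalexandra/University | 1st year/First Semester/FP/WrittenExam/problem_3.py | gcd_numbers_on_odd_pos
-- ===== SOURCE A (Python) =====
-- def gcd(a, b):
--     if a is None:
--         a = b
--     elif b is None:
--         b = a
--     while b:
--         a, b = b, a % b
--
--     return a
--
-- def gcd_numbers_on_odd_pos(l, r, list_of_numbers):
--     if l == r:
--         if l % 2 == 1:
--             return list_of_numbers[l]
--     else:
--         middle = (l + r) // 2
--         right = gcd_numbers_on_odd_pos(middle + 1, r, list_of_numbers)
--         left = gcd_numbers_on_odd_pos(l, middle, list_of_numbers)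
--         result = gcd(right, left)
--
--         return result
-- ===== SOURCE B (Python) =====
-- def _gcd2(a, b):
--     if b == 0:
--         return a
--     return _gcd2(b, a % b)
--
--
-- def gcd_numbers_on_odd_pos(l, r, list_of_numbers):
--     # One descending skip-2 pass directly over the odd indices (no parity test
--     # per element), with a recursive Euclid and None handled at the fold level.
--     top = r if r % 2 == 1 else r - 1
--     result = None
--     for i in range(top, l - 1, -2):
--         x = list_of_numbers[i]
--         result = x if result is None else _gcd2(result, x)
--     return result
-- ===== Notes on version B (the rewrite author's own statement) =====
-- stated objective: simpler
-- what changed: Replaced the midpoint divide-and-conquer recursion (combine gcd(right,left) over a recursion tree) by a single descending step-2 loop that visits only the odd indices directly (top odd index computed once, no per-element parity test), folds a recursive Euclid helper over them, and handles the None identity at the fold level instead of inside gcd; valid because the None-identity gcd combine is associative and descending order preserves gcd's divisor-sign behaviour on negative inputs.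
-- crash fix: When l > r, A recurses forever past its base case and raises RecursionError, while B's empty loop returns None. — e.g. on gcd_numbers_on_odd_pos(1, 0, [5]): A raises RecursionError, B returns none
import Mathlib
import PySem

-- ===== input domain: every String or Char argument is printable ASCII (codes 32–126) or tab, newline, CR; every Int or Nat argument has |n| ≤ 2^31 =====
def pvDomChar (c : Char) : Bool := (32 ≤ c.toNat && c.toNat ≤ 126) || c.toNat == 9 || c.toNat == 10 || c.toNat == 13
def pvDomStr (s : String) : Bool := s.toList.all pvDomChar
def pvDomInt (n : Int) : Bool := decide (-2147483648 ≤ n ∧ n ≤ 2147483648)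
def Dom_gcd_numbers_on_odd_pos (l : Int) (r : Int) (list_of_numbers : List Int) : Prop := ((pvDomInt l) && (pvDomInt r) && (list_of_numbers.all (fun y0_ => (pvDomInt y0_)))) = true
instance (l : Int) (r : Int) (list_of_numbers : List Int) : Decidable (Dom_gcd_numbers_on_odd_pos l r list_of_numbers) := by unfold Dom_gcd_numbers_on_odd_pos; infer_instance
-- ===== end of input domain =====

-- B replaces A's midpoint divide-and-conquer by one descending step-2 loop over the odd
-- indices, folding a recursive Euclid helper with None handled at the fold level
-- (objective: simpler; equal value proved on Pre_).

-- ===== PORT A =====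
-- termination lemma for Euclid (Python '%' = floor mod, sign of the divisor);
-- cited by the termination proofs of pvEuclid (port A) and pvGcd2 (port B)
theorem pvMod_natAbs_lt (a b : Int) (h : b ≠ 0) :
    (PySem.Int.mod a b).natAbs < b.natAbs := by
  rcases lt_or_gt_of_ne h with hb | hb
  · have e : PySem.Int.mod a b = -PySem.Int.mod (-a) (-b) := by
      have := PySem.Int.mod_neg_neg (-a) (-b); simpa using this.symm
    have h1 : 0 ≤ PySem.Int.mod (-a) (-b) := by
      unfold PySem.Int.mod; exact Int.fmod_nonneg_of_pos (-a) (by omega)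
    have h2 : PySem.Int.mod (-a) (-b) < -b := by
      unfold PySem.Int.mod; exact Int.fmod_lt_of_pos (-a) (by omega)
    omega
  · have h1 : 0 ≤ PySem.Int.mod a b := by
      unfold PySem.Int.mod; exact Int.fmod_nonneg_of_pos a (by omega)
    have h2 : PySem.Int.mod a b < b := by
      unfold PySem.Int.mod; exact Int.fmod_lt_of_pos a hb
    omega

-- the 'while b: a, b = b, a % b' loop of A's gcd
def pvEuclid (a b : Int) : Int :=
  if h : b = 0 then a else pvEuclid b (PySem.Int.mod a b)
termination_by b.natAbs
decreasing_by exact pvMod_natAbs_lt a b h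

-- Python's gcd(a, b) with its None handling
def pyGcd (a b : Option Int) : Option Int :=
  match a, b with
  | none, none => none
  | none, some y => some (pvEuclid y y)      -- a = b, then the loop
  | some x, none => some (pvEuclid x x)      -- b = a, then the loop
  | some x, some y => some (pvEuclid x y)

-- fuel-bounded transcription of A's recursion (fuel only makes it total; on Pre_ it never runs out)
def pvGoA (fuel : Nat) (l r : Int) (xs : List Int) : Option Int :=
  match fuel with
  | 0 => none
  | Nat.succ f =>
    if l = r then
      (if PySem.Int.mod l 2 = 1 then PySem.List.pyGet? xs l else none)
    else
      let middle := PySem.Int.floordiv (l + r) 2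
      let right := pvGoA f (middle + 1) r xs
      let left := pvGoA f l middle xs
      pyGcd right left

def gcd_numbers_on_odd_pos (l : Int) (r : Int) (list_of_numbers : List Int) : Option Int :=
  pvGoA ((r - l).toNat + 1) l r list_of_numbers

-- ===== PORT B =====
-- Source B's recursive _gcd2
def pvGcd2 (a b : Int) : Int :=
  if h : b = 0 then a else pvGcd2 b (PySem.Int.mod a b)
termination_by b.natAbs
decreasing_by exact pvMod_natAbs_lt a b h

-- 'top = r if r % 2 == 1 else r - 1'
def pvOddTop (r : Int) : Int := if PySem.Int.mod r 2 = 1 then r else r - 1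

-- loop body: 'x = list_of_numbers[i]; result = x if result is None else _gcd2(result, x)'
def pvStepB (xs : List Int) (result : Option Int) (i : Int) : Option Int :=
  match result with
  | none => PySem.List.pyGet? xs i
  | some a => (PySem.List.pyGet? xs i).map (fun x => pvGcd2 a x)

def gcd_numbers_on_odd_pos_alt (l : Int) (r : Int) (list_of_numbers : List Int) : Option Int :=
  (PySem.List.pyRange (pvOddTop r) (l - 1) (-2)).foldl (pvStepB list_of_numbers) none

-- ===== PRECONDITION & SPEC =====
-- Pre_: A's recursion reaches its base cases only when l ≤ r (otherwise RecursionError),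
-- and every odd index in [l, r] must be a valid (possibly negative) index of the list.
def Pre_gcd_numbers_on_odd_pos (l : Int) (r : Int) (list_of_numbers : List Int) : Prop :=
  l ≤ r ∧
    ((if l % 2 = 1 then l else l + 1) ≤ (if r % 2 = 1 then r else r - 1) →
      -(list_of_numbers.length : Int) ≤ (if l % 2 = 1 then l else l + 1) ∧
        (if r % 2 = 1 then r else r - 1) < (list_of_numbers.length : Int))
instance (l : Int) (r : Int) (list_of_numbers : List Int) : Decidable (Pre_gcd_numbers_on_odd_pos l r list_of_numbers) := by unfold Pre_gcd_numbers_on_odd_pos; infer_instance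

def pvWitness_gcd_numbers_on_odd_pos : Int × Int × List Int := (0, 2, [4, 6, 8])

-- When l > r, A recurses forever past its base case and raises RecursionError, while B's empty loop returns None.
def Raises_gcd_numbers_on_odd_pos (l : Int) (r : Int) (list_of_numbers : List Int) : Prop := r < l
instance (l : Int) (r : Int) (list_of_numbers : List Int) : Decidable (Raises_gcd_numbers_on_odd_pos l r list_of_numbers) := by unfold Raises_gcd_numbers_on_odd_pos; infer_instance
def pvRaiseWitness_gcd_numbers_on_odd_pos : Int × Int × List Int := (1, 0, [5])
def pvRaiseWitnessOut_gcd_numbers_on_odd_pos : Option Int := none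

def Spec_gcd_numbers_on_odd_pos (l : Int) (r : Int) (list_of_numbers : List Int) (out : Option Int) : Prop := out = gcd_numbers_on_odd_pos_alt l r list_of_numbers
instance (l : Int) (r : Int) (list_of_numbers : List Int) (out : Option Int) : Decidable (Spec_gcd_numbers_on_odd_pos l r list_of_numbers out) := by unfold Spec_gcd_numbers_on_odd_pos; infer_instance

-- ===== CLAIM (what is proved, stated in full; the proofs are below) =====
def Claim_equal_gcd_numbers_on_odd_pos : Prop := ∀ (l : Int) (r : Int) (list_of_numbers : List Int), Dom_gcd_numbers_on_odd_pos l r list_of_numbers → Pre_gcd_numbers_on_odd_pos l r list_of_numbers → Spec_gcd_numbers_on_odd_pos l r list_of_numbers (gcd_numbers_on_odd_pos l r list_of_numbers)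
def Claim_raises_gcd_numbers_on_odd_pos : Prop := (∀ (l : Int) (r : Int) (list_of_numbers : List Int), Dom_gcd_numbers_on_odd_pos l r list_of_numbers → Raises_gcd_numbers_on_odd_pos l r list_of_numbers → ¬ Pre_gcd_numbers_on_odd_pos l r list_of_numbers) ∧ (Dom_gcd_numbers_on_odd_pos (pvRaiseWitness_gcd_numbers_on_odd_pos.1) (pvRaiseWitness_gcd_numbers_on_odd_pos.2.1) (pvRaiseWitness_gcd_numbers_on_odd_pos.2.2) ∧ Raises_gcd_numbers_on_odd_pos (pvRaiseWitness_gcd_numbers_on_odd_pos.1) (pvRaiseWitness_gcd_numbers_on_odd_pos.2.1) (pvRaiseWitness_gcd_numbers_on_odd_pos.2.2) ∧ gcd_numbers_on_odd_pos_alt (pvRaiseWitness_gcd_numbers_on_odd_pos.1) (pvRaiseWitness_gcd_numbers_on_odd_pos.2.1) (pvRaiseWitness_gcd_numbers_on_odd_pos.2.2) = pvRaiseWitnessOut_gcd_numbers_on_odd_pos)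

-- ===== LEMMAS AND PROOFS =====

theorem pvMod_sign (a b : Int) (hb : b ≠ 0) (hm : PySem.Int.mod a b ≠ 0) :
    (PySem.Int.mod a b).sign = b.sign := by
  rcases lt_or_gt_of_ne hb with h | h
  · have e : PySem.Int.mod a b = -PySem.Int.mod (-a) (-b) := by
      have := PySem.Int.mod_neg_neg (-a) (-b); simpa using this.symm
    have h1 : 0 ≤ PySem.Int.mod (-a) (-b) := by
      unfold PySem.Int.mod; exact Int.fmod_nonneg_of_pos (-a) (by omega)
    have : PySem.Int.mod a b < 0 := by omega
    rw [Int.sign_eq_neg_one_iff_neg.mpr this, (Int.sign_eq_neg_one_iff_neg.mpr h)]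
  · have h1 : 0 ≤ PySem.Int.mod a b := by
      unfold PySem.Int.mod; exact Int.fmod_nonneg_of_pos a (by omega)
    have : 0 < PySem.Int.mod a b := by omega
    rw [Int.sign_eq_one_iff_pos.mpr this, Int.sign_eq_one_iff_pos.mpr h]

theorem pvMod_gcd (a b : Int) : Int.gcd b (PySem.Int.mod a b) = Int.gcd a b := by
  show Int.gcd b (Int.fmod a b) = Int.gcd a b
  rw [Int.fmod_def, Int.gcd_comm a b]
  exact Int.gcd_sub_mul_left_right b a (a.fdiv b)

-- closed form of the Euclid loop: magnitude is the gcd, sign follows the divisor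
theorem pvEuclid_eq (a b : Int) :
    pvEuclid a b = if b = 0 then a else b.sign * (Int.gcd a b : Int) := by
  induction hn : b.natAbs using Nat.strong_induction_on generalizing a b with
  | _ n ih =>
    by_cases hb : b = 0
    · rw [pvEuclid]; simp [hb]
    · rw [pvEuclid]; rw [dif_neg hb, if_neg hb]
      by_cases hm : PySem.Int.mod a b = 0
      · have h2 : pvEuclid b (PySem.Int.mod a b) = b := by
          rw [hm, pvEuclid]; simp
        have h3 : Int.gcd a b = b.natAbs :=
          Int.gcd_eq_natAbs_right_iff_dvd.mpr ((PySem.Int.mod_eq_zero_iff_dvd a b).mp hm)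
        rw [h2, h3, Int.sign_mul_natAbs]
      · rw [ih (PySem.Int.mod a b).natAbs (by subst hn; exact pvMod_natAbs_lt a b hb) b _ rfl,
          if_neg hm, pvMod_sign a b hb hm, pvMod_gcd]

theorem pvEuclid_self (a : Int) : pvEuclid a a = a := by
  rw [pvEuclid_eq]
  by_cases h : a = 0
  · simp [h]
  · rw [if_neg h, Int.gcd_self, Int.sign_mul_natAbs]

theorem pvGcd2_eq_pvEuclid (a b : Int) : pvGcd2 a b = pvEuclid a b := by
  induction hn : b.natAbs using Nat.strong_induction_on generalizing a b with
  | _ n ih =>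
    by_cases hb : b = 0
    · rw [pvGcd2, pvEuclid]; simp [hb]
    · rw [pvGcd2, pvEuclid, dif_neg hb, dif_neg hb]
      exact ih (PySem.Int.mod a b).natAbs (by subst hn; exact pvMod_natAbs_lt a b hb) b _ rfl

theorem pyGcd_none_left (w : Option Int) : pyGcd none w = w := by
  cases w with
  | none => rfl
  | some y => simp [pyGcd, pvEuclid_self]

theorem pyGcd_none_right (w : Option Int) : pyGcd w none = w := by
  cases w with
  | none => rfl
  | some y => simp [pyGcd, pvEuclid_self]

theorem pvEuclid_assoc (x y z : Int) :
    pvEuclid (pvEuclid x y) z = pvEuclid x (pvEuclid y z) := by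
  by_cases hz : z = 0
  · subst hz
    rw [pvEuclid_eq (pvEuclid x y) 0, if_pos rfl, pvEuclid_eq y 0, if_pos rfl]
  · by_cases hy : y = 0
    · subst hy
      rw [pvEuclid_eq x 0, if_pos rfl, pvEuclid_eq 0 z, if_neg hz]
      have : z.sign * (Int.gcd 0 z : Int) = z := by
        rw [Int.gcd_zero_left]; exact Int.sign_mul_natAbs z
      rw [this]
    · have hEyz : pvEuclid y z = z.sign * (Int.gcd y z : Int) := by
        rw [pvEuclid_eq, if_neg hz]
      have hgyz : 0 < Int.gcd y z := Int.gcd_pos_iff.mpr (Or.inr hz)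
      have hEyz0 : pvEuclid y z ≠ 0 := by
        rw [hEyz]
        intro h
        rcases mul_eq_zero.mp h with h | h
        · exact hz (Int.sign_eq_zero_iff_zero.mp h)
        · exact absurd h (by exact_mod_cast hgyz.ne')
      have hExy : pvEuclid x y = y.sign * (Int.gcd x y : Int) := by
        rw [pvEuclid_eq, if_neg hy]
      rw [pvEuclid_eq (pvEuclid x y) z, if_neg hz, pvEuclid_eq x (pvEuclid y z), if_neg hEyz0]
      have hsign : (pvEuclid y z).sign = z.sign := by
        rw [hEyz, Int.sign_mul, Int.sign_sign,
          Int.sign_eq_one_iff_pos.mpr (show (0:Int) < (Int.gcd y z : Int) by exact_mod_cast hgyz),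
          mul_one]
      have hnat : (pvEuclid y z).natAbs = Int.gcd y z := by
        rw [hEyz, Int.natAbs_mul, Int.natAbs_sign, if_neg hz, one_mul, Int.natAbs_natCast]
      have hnatxy : (pvEuclid x y).natAbs = Int.gcd x y := by
        rw [hExy, Int.natAbs_mul, Int.natAbs_sign, if_neg hy, one_mul, Int.natAbs_natCast]
      rw [hsign]
      congr 1
      exact_mod_cast congrArg (Nat.cast : Nat → Int)
        (by rw [Int.gcd, Int.gcd, hnat, hnatxy]
            show Nat.gcd (Int.gcd x y) z.natAbs = Nat.gcd x.natAbs (Int.gcd y z)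
            rw [Int.gcd, Int.gcd, Nat.gcd_assoc])

theorem pyGcd_assoc (a b c : Option Int) :
    pyGcd (pyGcd a b) c = pyGcd a (pyGcd b c) := by
  cases a with
  | none => rw [pyGcd_none_left, pyGcd_none_left]
  | some x => cases b with
    | none => rw [pyGcd_none_right, pyGcd_none_left]
    | some y => cases c with
      | none => rw [pyGcd_none_right, pyGcd_none_right]
      | some z => simp [pyGcd, pvEuclid_assoc]

-- proof-side bridge: the linear fold over ALL indices of [l, r], descending
def pvStep (xs : List Int) (result : Option Int) (i : Int) : Option Int :=
  if PySem.Int.mod i 2 = 1 then pyGcd result (PySem.List.pyGet? xs i) else result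

theorem pvStep_pyGcd (xs : List Int) (a b : Option Int) (i : Int) :
    pvStep xs (pyGcd a b) i = pyGcd a (pvStep xs b i) := by
  unfold pvStep
  split
  · exact pyGcd_assoc a b _
  · rfl

theorem foldl_pvStep_pyGcd (xs : List Int) (L : List Int) (a b : Option Int) :
    L.foldl (pvStep xs) (pyGcd a b) = pyGcd a (L.foldl (pvStep xs) b) := by
  induction L generalizing b with
  | nil => rfl
  | cons i L ih => simpa [List.foldl, pvStep_pyGcd] using ih (pvStep xs b i)

theorem foldl_pvStep_from_none (xs : List Int) (L : List Int) (a : Option Int) :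
    L.foldl (pvStep xs) a = pyGcd a (L.foldl (pvStep xs) none) := by
  conv_lhs => rw [← pyGcd_none_right a]
  exact foldl_pvStep_pyGcd xs L a none

theorem pyRange_neg_one_append (a m b : Int) (h1 : b ≤ m) (h2 : m ≤ a) :
    PySem.List.pyRange a b (-1) =
      PySem.List.pyRange a m (-1) ++ PySem.List.pyRange m b (-1) := by
  rw [PySem.List.pyRange_neg_one_eq_reverse, PySem.List.pyRange_neg_one_eq_reverse,
    PySem.List.pyRange_neg_one_eq_reverse,
    PySem.List.pyRange_one_append (b + 1) (m + 1) (a + 1) (by omega) (by omega),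
    List.reverse_append]

-- A equals the linear descending fold over all indices (the old bridge)
theorem pvGoA_eq (fuel : Nat) (l r : Int) (xs : List Int)
    (hlr : l ≤ r) (hf : (r - l).toNat < fuel) :
    pvGoA fuel l r xs = (PySem.List.pyRange r (l - 1) (-1)).foldl (pvStep xs) none := by
  induction fuel generalizing l r with
  | zero => omega
  | succ f ih =>
    by_cases heq : l = r
    · subst heq
      rw [PySem.List.pyRange_neg_one_cons (by omega),
        PySem.List.pyRange_neg_one_eq_nil (by omega)]
      simp only [pvGoA, if_true]
      simp only [List.foldl, pvStep]
      split
      · cases h : PySem.List.pyGet? xs l with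
        | none => simp [pyGcd]
        | some v => simp [pyGcd_none_left]
      · rfl
    · have hlt : l < r := lt_of_le_of_ne hlr heq
      have hm1 : l ≤ PySem.Int.floordiv (l + r) 2 := by
        rw [PySem.Int.le_floordiv_iff_mul_le (by omega)]; omega
      have hm2 : PySem.Int.floordiv (l + r) 2 < r := by
        rw [PySem.Int.floordiv_lt_iff_lt_mul (by omega)]; omega
      set m := PySem.Int.floordiv (l + r) 2 with hm
      have e1 : pvGoA f (m + 1) r xs
          = (PySem.List.pyRange r m (-1)).foldl (pvStep xs) none := by
        have := ih (m + 1) r (by omega) (by omega)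
        simpa using this
      have e2 : pvGoA f l m xs
          = (PySem.List.pyRange m (l - 1) (-1)).foldl (pvStep xs) none := by
        exact ih l m (by omega) (by omega)
      show pvGoA (Nat.succ f) l r xs = _
      simp only [pvGoA, if_neg heq]
      rw [← hm, e1, e2,
        pyRange_neg_one_append r m (l - 1) (by omega) (by omega),
        List.foldl_append]
      conv_rhs => rw [foldl_pvStep_from_none]

-- Python '%' with divisor 2 is Lean's emod
theorem pvMod_two (i : Int) : PySem.Int.mod i 2 = i % 2 := by
  unfold PySem.Int.mod
  rw [Int.fmod_eq_emod]
  simp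

-- range(a, b, -2): nil and cons forms, from pyRange's definition
theorem pyRange_neg_two_eq_nil (a b : Int) (h : a ≤ b) :
    PySem.List.pyRange a b (-2) = [] := by
  simp only [PySem.List.pyRange]
  norm_num
  intro h2
  omega

theorem pyRange_neg_two_cons (a b : Int) (h : b < a) :
    PySem.List.pyRange a b (-2) = a :: PySem.List.pyRange (a - 2) b (-2) := by
  simp only [PySem.List.pyRange]
  norm_num
  rw [if_pos h]
  by_cases h2 : b < a - 2
  · rw [if_pos h2]
    have hcount : ((a - b + 2 - 1) / 2).toNat = ((a - 2 - b + 2 - 1) / 2).toNat + 1 := by omega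
    rw [hcount, List.range_succ_eq_map]
    simp only [List.map_cons, List.map_map]
    congr 1
    · norm_num
    · apply List.map_congr_left
      intro k _
      simp only [Function.comp_apply]
      push_cast
      ring
  · rw [if_neg h2]
    have hcount : ((a - b + 2 - 1) / 2).toNat = 1 := by omega
    rw [hcount]
    simp

-- the descending all-index fold equals B's skip-2 fold, given odd indices are in range
theorem foldl_pvStep_eq_pvStepB (xs : List Int) (l : Int) (n : Nat) :
    ∀ r : Int, (r - (l - 1)).toNat = n →
    (∀ i : Int, l ≤ i → i ≤ r → PySem.Int.mod i 2 = 1 →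
      PySem.Raise.InRange xs.length i) →
    ∀ res : Option Int,
    (PySem.List.pyRange r (l - 1) (-1)).foldl (pvStep xs) res
      = (PySem.List.pyRange (pvOddTop r) (l - 1) (-2)).foldl (pvStepB xs) res := by
  induction n using Nat.strong_induction_on with
  | _ n ih =>
    intro r hn hInR res
    by_cases hr : r < l
    · rw [PySem.List.pyRange_neg_one_eq_nil (by omega),
        pyRange_neg_two_eq_nil _ _ (by unfold pvOddTop; split <;> omega)]
      rfl
    · have hparity : PySem.Int.mod r 2 = 1 ∨ PySem.Int.mod r 2 = 0 := by
        rw [pvMod_two]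
        omega
      rw [PySem.List.pyRange_neg_one_cons (by omega)]
      rcases hparity with hodd | heven
      · -- r odd: both ranges start with r
        have hIn : PySem.Raise.InRange xs.length r := hInR r (by omega) le_rfl hodd
        obtain ⟨x, hx⟩ : ∃ x, PySem.List.pyGet? xs r = some x := by
          cases hget : PySem.List.pyGet? xs r with
          | none => exact absurd ((PySem.List.pyGet?_eq_none_iff xs r).mp hget) (by simpa using hIn)
          | some v => exact ⟨v, rfl⟩
        have hstep : pvStep xs res r = pvStepB xs res r := by
          unfold pvStep pvStepB
          rw [if_pos hodd, hx]
          cases res with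
          | none => simp [pyGcd_none_left]
          | some a => simp [pyGcd, pvGcd2_eq_pvEuclid]
        have htop : pvOddTop r = r := by unfold pvOddTop; rw [if_pos hodd]
        rw [htop, pyRange_neg_two_cons _ _ (by omega)]
        simp only [List.foldl_cons, hstep]
        have htail : (PySem.List.pyRange (r - 1) (l - 1) (-1)).foldl (pvStep xs) (pvStepB xs res r)
            = (PySem.List.pyRange (pvOddTop (r - 1)) (l - 1) (-2)).foldl (pvStepB xs)
                (pvStepB xs res r) :=
          ih (r - 1 - (l - 1)).toNat (by omega) (r - 1) rfl
            (fun i h1 h2 h3 => hInR i h1 (by omega) h3) _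
        have htop' : pvOddTop (r - 1) = r - 2 := by
          rw [pvMod_two] at hodd
          unfold pvOddTop
          rw [pvMod_two, if_neg (by omega)]
          ring
        rw [htail, htop']
      · -- r even: pvStep skips it and the top odd index is r - 1
        have hstep : pvStep xs res r = res := by
          unfold pvStep; rw [if_neg (by omega)]
        have htop : pvOddTop r = r - 1 := by
          unfold pvOddTop; rw [if_neg (by omega)]
        have htop' : pvOddTop (r - 1) = r - 1 := by
          rw [pvMod_two] at heven
          unfold pvOddTop
          rw [pvMod_two, if_pos (by omega)]
        rw [List.foldl_cons, hstep, htop,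
          ih (r - 1 - (l - 1)).toNat (by omega) (r - 1) rfl
            (fun i h1 h2 h3 => hInR i h1 (by omega) h3) res, htop']

-- ===== VERDICT (by name: the statement is the Claim_ definition above) =====
theorem gcd_numbers_on_odd_pos_spec : Claim_equal_gcd_numbers_on_odd_pos := by
  intro l r xs _hDom hPre
  unfold Spec_gcd_numbers_on_odd_pos gcd_numbers_on_odd_pos gcd_numbers_on_odd_pos_alt
  rw [pvGoA_eq _ l r xs hPre.1 (by omega)]
  refine foldl_pvStep_eq_pvStepB xs l (r - (l - 1)).toNat r rfl (fun i h1 h2 h3 => ?_) none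
  rw [pvMod_two] at h3
  have hlow : (if l % 2 = 1 then l else l + 1) ≤ i := by split <;> omega
  have hhigh : i ≤ (if r % 2 = 1 then r else r - 1) := by split <;> omega
  have hb := hPre.2 (le_trans hlow hhigh)
  simp only [PySem.Raise.InRange]
  omega

@[simp] theorem gcd_numbers_on_odd_pos_raises : Claim_raises_gcd_numbers_on_odd_pos := by
  unfold Claim_raises_gcd_numbers_on_odd_pos
  constructor
  · intro l r xs _hDom hR hPre
    exact absurd hPre.1 (by unfold Raises_gcd_numbers_on_odd_pos at hR; omega)
  · exact ⟨by decide, by decide, by decide⟩
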